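-- pv_equiv track=rewrite | github.com/UserBlackBox/competitive-programming | binarysearch/List-Partitioning.py | solve
-- ===== SOURCE A (Python) =====
-- def solve(strs):
--     red = 0
--     green = 0
--     blue = 0
--     for i in strs:
--         if i == 'red':
--             red += 1
--         if i == 'green':
--             green += 1
--         if i == 'blue':
--             blue += 1
--     strs = []
--     for i in range(red):
--         strs.append("red")
--     for i in range(green):
--         strs.append("green")
--     for i in range(blue):
--         strs.append("blue")
--     return strs
-- ===== SOURCE B (Python) =====
-- def _key(s):
--     return 0 if s == 'red' else 1 if s == 'green' else 2
--
--
-- def solve(strs):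
--     return sorted([s for s in strs if s in ('red', 'green', 'blue')], key=_key)
-- ===== Notes on version B (the rewrite author's own statement) =====
-- stated objective: simpler
-- what changed: Replaced A's three counters plus three range-append rebuild loops by a single filter keeping only 'red'/'green'/'blue' followed by a stable sort under the custom red<green<blue key.
import Mathlib
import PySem

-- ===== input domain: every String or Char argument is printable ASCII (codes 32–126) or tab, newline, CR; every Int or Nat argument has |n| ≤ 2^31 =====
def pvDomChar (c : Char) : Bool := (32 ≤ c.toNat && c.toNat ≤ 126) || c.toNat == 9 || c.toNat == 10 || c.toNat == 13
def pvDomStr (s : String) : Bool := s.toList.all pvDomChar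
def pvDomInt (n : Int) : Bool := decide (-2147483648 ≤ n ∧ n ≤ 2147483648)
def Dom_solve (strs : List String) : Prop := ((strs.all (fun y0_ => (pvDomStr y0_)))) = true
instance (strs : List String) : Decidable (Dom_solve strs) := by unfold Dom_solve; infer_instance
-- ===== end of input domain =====

-- B replaces A's three counters and three rebuild loops by one filter and one stable
-- sort under the custom red<green<blue key (objective: simpler; not faster).

-- ===== PORT A =====
def solve (strs : List String) : List String :=
  -- three counters updated by one pass, then three append loops over range(...)
  let cnt := strs.foldl
    (fun (acc : Int × Int × Int) i =>
      (if i = "red" then acc.1 + 1 else acc.1,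
       if i = "green" then acc.2.1 + 1 else acc.2.1,
       if i = "blue" then acc.2.2 + 1 else acc.2.2)) (0, 0, 0)
  let s1 := (PySem.List.pyRange 0 cnt.1 1).foldl (fun acc _ => acc ++ ["red"]) []
  let s2 := (PySem.List.pyRange 0 cnt.2.1 1).foldl (fun acc _ => acc ++ ["green"]) s1
  (PySem.List.pyRange 0 cnt.2.2 1).foldl (fun acc _ => acc ++ ["blue"]) s2

-- ===== PORT B =====
def pvKey (s : String) : Int :=
  if s = "red" then 0 else if s = "green" then 1 else 2

def solve_alt (strs : List String) : List String :=
  PySem.List.sorted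
    (strs.filter (fun s => decide (s ∈ (["red", "green", "blue"] : List String))))
    pvKey

-- ===== PRECONDITION & SPEC =====
def Spec_solve (strs : List String) (out : List String) : Prop := out = solve_alt strs
instance (strs : List String) (out : List String) : Decidable (Spec_solve strs out) := by unfold Spec_solve; infer_instance

-- ===== CLAIM (what is proved, stated in full; the proofs are below) =====
def Claim_equal_solve : Prop := ∀ (strs : List String), Dom_solve strs → Spec_solve strs (solve strs)

-- ===== LEMMAS AND PROOFS =====

/-- Canonical value both programs compute. -/
def pvTarget (strs : List String) : List String :=
  List.replicate (strs.count "red") "red" ++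
  List.replicate (strs.count "green") "green" ++
  List.replicate (strs.count "blue") "blue"

/-- The comparison the stable insertion sort uses under `pvKey`. -/
def pvBr (a b : String) : Bool := decide (pvKey a < pvKey b)

lemma insStep (x y : String) (ys : List String) :
    PySem.List.insertBy pvBr x (y :: ys)
    = if pvBr x y = true then x :: y :: ys else y :: PySem.List.insertBy pvBr x ys := by
  simp [PySem.List.insertBy]

lemma counters_eq (strs : List String) : ∀ (r g b : Int),
    strs.foldl
      (fun (acc : Int × Int × Int) i =>
        (if i = "red" then acc.1 + 1 else acc.1,
         if i = "green" then acc.2.1 + 1 else acc.2.1,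
         if i = "blue" then acc.2.2 + 1 else acc.2.2)) (r, g, b)
    = (r + strs.count "red", g + strs.count "green", b + strs.count "blue") := by
  induction strs with
  | nil => simp
  | cons x xs ih =>
    intro r g b
    simp only [List.foldl_cons, ih, List.count_cons, beq_iff_eq]
    refine Prod.ext ?_ (Prod.ext ?_ ?_) <;> simp <;> split_ifs <;> omega

lemma solve_eq_target (strs : List String) : solve strs = pvTarget strs := by
  simp only [solve, counters_eq, PySem.List.foldl_append_singleton_eq_map, pvTarget]
  simp [List.map_const']

lemma ins_red (a g b : Nat) :
    PySem.List.insertBy pvBr "red"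
      (List.replicate a "red" ++ List.replicate g "green" ++ List.replicate b "blue")
    = List.replicate (a + 1) "red" ++ List.replicate g "green" ++ List.replicate b "blue" := by
  induction a with
  | zero =>
    cases g with
    | zero =>
      cases b with
      | zero => simp [PySem.List.insertBy]
      | succ b =>
        simp only [List.replicate_succ, List.replicate_zero, List.nil_append, insStep]
        have h : pvBr "red" "blue" = true := by decide
        rw [h, if_pos rfl]
        simp
    | succ g =>
      simp only [List.replicate_succ, List.replicate_zero, List.nil_append, List.cons_append,
        insStep]
      have h : pvBr "red" "green" = true := by decide
      rw [h, if_pos rfl]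
  | succ a ih =>
    simp only [List.replicate_succ, List.cons_append, insStep]
    have h : pvBr "red" "red" = false := by decide
    rw [h, if_neg Bool.false_ne_true, ih]
    simp [List.replicate_succ]

lemma ins_green (a g b : Nat) :
    PySem.List.insertBy pvBr "green"
      (List.replicate a "red" ++ List.replicate g "green" ++ List.replicate b "blue")
    = List.replicate a "red" ++ List.replicate (g + 1) "green" ++ List.replicate b "blue" := by
  induction a with
  | zero =>
    induction g with
    | zero =>
      cases b with
      | zero => simp [PySem.List.insertBy]
      | succ b =>
        simp only [List.replicate_succ, List.replicate_zero, List.nil_append, insStep]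
        have h : pvBr "green" "blue" = true := by decide
        rw [h, if_pos rfl]
        simp
    | succ g ih =>
      simp only [List.replicate_succ, List.replicate_zero, List.nil_append, List.cons_append,
        insStep] at ih ⊢
      have h : pvBr "green" "green" = false := by decide
      rw [h, if_neg Bool.false_ne_true, ih]
  | succ a ih =>
    simp only [List.replicate_succ, List.cons_append, insStep]
    have h : pvBr "green" "red" = false := by decide
    rw [h, if_neg Bool.false_ne_true, ih]
    simp [List.replicate_succ]

lemma ins_blue (a g b : Nat) :
    PySem.List.insertBy pvBr "blue"
      (List.replicate a "red" ++ List.replicate g "green" ++ List.replicate b "blue")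
    = List.replicate a "red" ++ List.replicate g "green" ++ List.replicate (b + 1) "blue" := by
  induction a with
  | zero =>
    induction g with
    | zero =>
      induction b with
      | zero => simp [PySem.List.insertBy]
      | succ b ih =>
        simp only [List.replicate_succ, List.replicate_zero, List.nil_append, insStep] at ih ⊢
        have h : pvBr "blue" "blue" = false := by decide
        rw [h, if_neg Bool.false_ne_true, ih]
    | succ g ih =>
      simp only [List.replicate_succ, List.replicate_zero, List.nil_append, List.cons_append,
        insStep] at ih ⊢
      have h : pvBr "blue" "green" = false := by decide
      rw [h, if_neg Bool.false_ne_true, ih]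
  | succ a ih =>
    simp only [List.replicate_succ, List.cons_append, insStep]
    have h : pvBr "blue" "red" = false := by decide
    rw [h, if_neg Bool.false_ne_true, ih]
    simp [List.replicate_succ]

lemma fold_inv (strs : List String) : ∀ (a g b : Nat),
    (strs.filter (fun s => decide (s ∈ (["red", "green", "blue"] : List String)))).foldl
      (fun acc x => PySem.List.insertBy pvBr x acc)
      (List.replicate a "red" ++ List.replicate g "green" ++ List.replicate b "blue")
    = List.replicate (a + strs.count "red") "red" ++
      List.replicate (g + strs.count "green") "green" ++
      List.replicate (b + strs.count "blue") "blue" := by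
  induction strs with
  | nil => simp
  | cons x xs ih =>
    intro a g b
    by_cases hr : x = "red"
    · subst hr
      rw [List.filter_cons_of_pos (by decide), List.foldl_cons, ins_red, ih]
      simp [Nat.add_comm, Nat.add_left_comm]
    · by_cases hg : x = "green"
      · subst hg
        rw [List.filter_cons_of_pos (by decide), List.foldl_cons, ins_green, ih]
        simp [Nat.add_comm, Nat.add_left_comm]
      · by_cases hb : x = "blue"
        · subst hb
          rw [List.filter_cons_of_pos (by decide), List.foldl_cons, ins_blue, ih]
          simp [Nat.add_comm, Nat.add_left_comm]
        · rw [List.filter_cons_of_neg (by simp [hr, hg, hb])]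
          simpa [List.count_cons, hr, hg, hb, Ne.symm hr, Ne.symm hg, Ne.symm hb]
            using ih a g b

lemma solve_alt_eq_target (strs : List String) : solve_alt strs = pvTarget strs := by
  rw [solve_alt, PySem.List.sorted_eq_foldl_insertBy]
  have h := fold_inv strs 0 0 0
  simpa [pvTarget, pvBr] using h

-- ===== VERDICT (by name: the statement is the Claim_ definition above) =====
theorem solve_spec : Claim_equal_solve := by
  intro strs _
  unfold Spec_solve
  rw [solve_eq_target, solve_alt_eq_target]
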